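-- pv_equiv track=rewrite | github.com/H43RO/PythonAlgorithm | 00.Solve/BOJ/17000-18000/17140.py | sort_graph
-- ===== SOURCE A (Python) =====
-- def sort_graph(graph, command):
--     result = []
--
--     if command == "C":  # 연산의 편의를 위해 전치시킴
--         graph = list(map(list, zip(*graph)))
--
--     # R, C 공통 연산
--     for x in graph:  # 행 한 줄씩 탐색
--         temp = []
--         count = []
--         for a in set(x):  # 해당 행에 등장하는 숫자들 하나씩 순회
--             if a == 0:  # 만약 0이면 제낌
--                 continue
--             count.append((a, x.count(a)))  # 해당 숫자와 행에 몇 번 등장했는지와 함께 저장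
--
--         for num, cnt in sorted(count, key=lambda x: (x[1], x[0])):  # 등장 횟수 오름차순, 숫자 오름차순으로 정렬된 리스트 순회
--             temp.extend([num, cnt])  # temp 리스트에 숫자와 등장횟수 넣어줌
--
--         result.append(temp)  # 한 행에 대한 정렬 결과를 result 에 넣어줌
--
--     # 위 연산이 끝나게 되면, result 에 모든 행들이 정렬되어 저장돼있음
--     for x in result:  # 행 한 줄씩 탐색
--         while len(x) < len(max(result, key=lambda x: len(x))):  # 현재 행이 가장 긴 행보다 짧다면
--             x.append(0)  # 길이가 같아질 때까지 0 추가
--         x = x[:100]  # 만약 길이가 100이 넘어가면 100 넘어가는 부분 몽땅 버림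
--
--     if command == "C":  # 만약 C 연산이었다면, 마지막에 다시 전치시켜야 함 (원상 복구)
--         result = list(map(list, zip(*result)))
--
--     return result
-- ===== SOURCE B (Python) =====
-- from itertools import groupby
--
--
-- def sort_graph(graph, command):
--     if command == "C":
--         graph = [list(col) for col in zip(*graph)]
--
--     rows = []
--     for row in graph:
--         # (count, value) pairs from equal runs of the sorted row, zeros skipped
--         pairs = sorted((len(list(run)), v) for v, run in groupby(sorted(row)) if v != 0)
--         rows.append([x for c, v in pairs for x in (v, c)])
--
--     width = max(map(len, rows), default=0)
--     rows = [r + [0] * (width - len(r)) for r in rows]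
--
--     if command == "C":
--         rows = [list(col) for col in zip(*rows)]
--     return rows
-- ===== Notes on version B (the rewrite author's own statement) =====
-- stated objective: faster
-- what changed: Per row, B sorts the row once and counts values by grouping equal runs (groupby over sorted(row)) instead of A's calling x.count(a) for every distinct value, and B pads all rows to a max length computed once instead of A's re-scanning for the longest row on every single appended zero.
import Mathlib
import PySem

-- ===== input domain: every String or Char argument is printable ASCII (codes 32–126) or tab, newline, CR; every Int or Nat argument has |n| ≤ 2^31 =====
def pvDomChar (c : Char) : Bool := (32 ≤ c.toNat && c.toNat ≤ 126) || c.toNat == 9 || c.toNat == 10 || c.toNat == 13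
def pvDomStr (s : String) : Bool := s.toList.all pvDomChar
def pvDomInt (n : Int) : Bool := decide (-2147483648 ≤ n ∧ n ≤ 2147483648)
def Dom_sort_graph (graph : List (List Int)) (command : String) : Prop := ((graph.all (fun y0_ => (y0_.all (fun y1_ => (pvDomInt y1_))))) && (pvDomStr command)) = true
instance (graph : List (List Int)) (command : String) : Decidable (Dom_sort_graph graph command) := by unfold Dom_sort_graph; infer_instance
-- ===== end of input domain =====

-- B replaces the quadratic per-row counting (x.count(a) for each a in set(x)) by sort-and-group
-- run counting, and replaces A's repeated max-scan padding loop by one max and one pad per row.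
-- Return-value equivalence only; neither program mutates its argument.


-- ===== PORT A =====
-- `list(map(list, zip(*g)))`: n-ary zip truncates to the shortest row (exact hand port of the
-- builtin; zip() of no iterables is empty). Used by both ports, since both Pythons call zip(*g).
def pyZipT (g : List (List Int)) : List (List Int) :=
  match (g.map List.length).min? with
  | none => []
  | some m => (List.range m).map (fun j => g.map (fun r => r.getD j 0))

-- `len(max(result, key=lambda x: len(x)))` — Python's max keeps the first maximal element;
-- only evaluated on a nonempty list, so the [] default of maxD is never taken.
def pyMaxLen (l : List (List Int)) : Nat :=
  (PySem.List.maxD l (fun r => PySem.List.len r) []).length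

-- the `while len(x) < len(max(result, key=len)): x.append(0)` loop; the Python list `result`
-- at this moment is done ++ x :: rest (done already processed, x being grown in place).
-- fuel = current max length bounds the number of appends (each needs x.length < that max).
def padWhile : Nat → List (List Int) → List Int → List (List Int) → List Int
  | 0, _, x, _ => x
  | f + 1, done, x, rest =>
    if PySem.List.len x < (pyMaxLen (done ++ x :: rest) : Int) then
      padWhile f done (x ++ [0]) rest
    else x

-- the `for x in result:` padding loop, threading the mutated list state
def padAll (done : List (List Int)) : List (List Int) → List (List Int)
  | [] => []
  | x :: rest =>
    let x' := padWhile (pyMaxLen (done ++ x :: rest)) done x rest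
    x' :: padAll (done ++ [x']) rest

def sort_graph (graph : List (List Int)) (command : String) : List (List Int) :=
  -- (the `x = x[:100]` line of A only rebinds the loop variable: a no-op, nothing to port)
  let graph := if command = "C" then pyZipT graph else graph
  let result := graph.foldl (fun result x =>
    -- `for a in set(x)`: consumed order-insensitively — count is then sorted under the
    -- key (cnt, num), which is injective on the distinct values of x.
    let count := (PySem.Set.ofList x).foldl
      (fun count a => if a = 0 then count else count ++ [(a, ((PySem.List.count x a : Nat) : Int))])
      ([] : List (Int × Int))
    let temp := (PySem.List.sorted2 count (fun p => p.2) (fun p => p.1)).foldl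
      (fun temp p => temp ++ [p.1, p.2]) ([] : List Int)
    result ++ [temp]) []
  let result := padAll [] result
  if command = "C" then pyZipT result else result

-- ===== PORT B =====
-- itertools.groupby over an (already sorted) list: (value, run length) per maximal equal run
def runCounts : List Int → List (Int × Int)
  | [] => []
  | a :: t =>
    (a, 1 + ((t.takeWhile (· == a)).length : Int)) :: runCounts (t.dropWhile (· == a))
  termination_by l => l.length
  decreasing_by
    have := List.length_dropWhile_le (· == a) t
    simp; omega

def sort_graph_alt (graph : List (List Int)) (command : String) : List (List Int) :=
  let g := if command = "C" then pyZipT graph else graph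
  let rows := g.map (fun row =>
    -- sorted((len(list(run)), v) for v, run in groupby(sorted(row)) if v != 0)
    let pairs := PySem.List.sorted2
      (((runCounts (PySem.List.sorted row (fun v => v))).filter
          (fun p => decide (p.1 ≠ 0))).map (fun p => (p.2, p.1)))
      (fun p => p.1) (fun p => p.2)
    pairs.flatMap (fun p => [p.2, p.1]))
  let width := PySem.List.maxD (rows.map (fun r => PySem.List.len r)) (fun n => n) 0
  let rows := rows.map (fun r => r ++ List.replicate (width - PySem.List.len r).toNat 0)
  if command = "C" then pyZipT rows else rows

-- ===== PRECONDITION & SPEC =====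
def Spec_sort_graph (graph : List (List Int)) (command : String) (out : List (List Int)) : Prop := out = sort_graph_alt graph command
instance (graph : List (List Int)) (command : String) (out : List (List Int)) : Decidable (Spec_sort_graph graph command out) := by unfold Spec_sort_graph; infer_instance

-- ===== CLAIM (what is proved, stated in full; the proofs are below) =====
def Claim_equal_sort_graph : Prop := ∀ (graph : List (List Int)) (command : String), Dom_sort_graph graph command → Spec_sort_graph graph command (sort_graph graph command)

-- ===== LEMMAS AND PROOFS =====

-- ---- the per-row result: A's set/count row equals B's sort/group row ----

theorem sorted2_eq_sorted_lex (xs : List (Int × Int)) (k1 k2 : Int × Int → Int) :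
    PySem.List.sorted2 xs k1 k2 = PySem.List.sorted xs (fun a => toLex (k1 a, k2 a)) := by
  have hb : (fun a b : Int × Int => decide (k1 a < k1 b) || (!decide (k1 b < k1 a) && decide (k2 a < k2 b)))
      = (fun a b : Int × Int => decide (toLex (k1 a, k2 a) < toLex (k1 b, k2 b))) := by
    funext a b
    rw [Bool.eq_iff_iff]
    simp only [Bool.or_eq_true, Bool.and_eq_true, Bool.not_eq_true', decide_eq_true_eq,
      decide_eq_false_iff_not, Prod.Lex.lt_iff, ofLex_toLex]
    omega
  simp only [PySem.List.sorted2, PySem.List.sorted, if_neg (by decide : ¬ (false = true))]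
  rw [hb]

theorem countA_eq (x : List Int) :
    (PySem.Set.ofList x).foldl
      (fun count a => if a = 0 then count else count ++ [(a, ((PySem.List.count x a : Nat) : Int))])
      ([] : List (Int × Int))
    = ((PySem.Set.ofList x).filter (fun a => decide (a ≠ 0))).map
        (fun a => (a, ((PySem.List.count x a : Nat) : Int))) := by
  have h : (fun (count : List (Int × Int)) (a : Int) =>
        if a = 0 then count else count ++ [(a, ((PySem.List.count x a : Nat) : Int))])
      = (fun count a => if a ≠ 0 then count ++ [(a, ((PySem.List.count x a : Nat) : Int))] else count) := by
    funext c a; by_cases ha : a = 0 <;> simp [ha]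
  rw [h, PySem.List.foldl_append_ite (p := fun a : Int => a ≠ 0)
    (f := fun a => (a, ((PySem.List.count x a : Nat) : Int)))]
  simp

theorem pyMaxLen_eq (L : List (List Int)) (M : Nat)
    (hle : ∀ r ∈ L, r.length ≤ M) (hex : ∃ r ∈ L, r.length = M) :
    pyMaxLen L = M := by
  obtain ⟨r, hr, hrM⟩ := hex
  unfold pyMaxLen PySem.List.maxD
  cases hm : PySem.List.max? L (fun r => PySem.List.len r) with
  | none => rw [PySem.List.max?_eq_none_iff] at hm; subst hm; simp at hr
  | some m =>
    have hmem := PySem.List.max?_mem hm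
    have hmax := PySem.List.max?_isMax hm r hr
    have h1 : m.length ≤ M := hle m hmem
    simp only [PySem.List.len_eq] at hmax
    simp only [Option.getD_some]
    omega

theorem width_eq (rows : List (List Int)) (h : rows ≠ []) :
    PySem.List.maxD (rows.map (fun r => PySem.List.len r)) (fun n => n) 0
      = (pyMaxLen rows : Int) := by
  unfold pyMaxLen PySem.List.maxD
  cases hw : PySem.List.max? (rows.map (fun r => PySem.List.len r)) (fun n => n) with
  | none =>
    rw [PySem.List.max?_eq_none_iff] at hw
    simp [List.map_eq_nil_iff] at hw; exact absurd hw h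
  | some w =>
    cases hm : PySem.List.max? rows (fun r => PySem.List.len r) with
    | none => rw [PySem.List.max?_eq_none_iff] at hm; exact absurd hm h
    | some m =>
      have hwmem := PySem.List.max?_mem hw
      have hmmem := PySem.List.max?_mem hm
      have hwmax := PySem.List.max?_isMax hw (PySem.List.len m)
        (List.mem_map_of_mem hmmem)
      obtain ⟨r0, hr0, hr0w⟩ := List.mem_map.mp hwmem
      have hmmax := PySem.List.max?_isMax hm r0 hr0
      simp only [Option.getD_some, PySem.List.len_eq] at *
      omega

theorem padWhile_spec (f : Nat) (done : List (List Int)) (x : List Int) (rest : List (List Int))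
    (M : Nat) (hle : ∀ r ∈ done ++ x :: rest, r.length ≤ M)
    (hex : ∃ r ∈ done ++ x :: rest, r.length = M) (hf : M - x.length ≤ f) :
    padWhile f done x rest = x ++ List.replicate (M - x.length) 0 := by
  induction f generalizing x with
  | zero =>
    have : M - x.length = 0 := Nat.le_zero.mp hf
    simp [padWhile, this]
  | succ f ih =>
    rw [padWhile, pyMaxLen_eq _ M hle hex]
    have hxle : x.length ≤ M := hle x (by simp)
    by_cases hlt : x.length < M
    · rw [if_pos (by simp only [PySem.List.len_eq]; exact_mod_cast hlt)]
      have hle' : ∀ r ∈ done ++ (x ++ [0]) :: rest, r.length ≤ M := by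
        intro r hr
        rcases List.mem_append.mp hr with h1 | h1
        · exact hle r (List.mem_append.mpr (Or.inl h1))
        · rcases List.mem_cons.mp h1 with h2 | h2
          · subst h2; simp; omega
          · exact hle r (by simp [h2])
      have hex' : ∃ r ∈ done ++ (x ++ [0]) :: rest, r.length = M := by
        obtain ⟨r, hr, hrM⟩ := hex
        refine ⟨r, ?_, hrM⟩
        rcases List.mem_append.mp hr with h1 | h1
        · exact List.mem_append.mpr (Or.inl h1)
        · rcases List.mem_cons.mp h1 with h2 | h2
          · exfalso; subst h2; omega
          · simp [h2]
      rw [ih (x ++ [0]) hle' hex' (by simp; omega)]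
      have : M - x.length = (M - (x.length + 1)) + 1 := by omega
      rw [this, List.replicate_succ]
      simp
    · rw [if_neg (by simp only [PySem.List.len_eq]; exact_mod_cast hlt)]
      have : M - x.length = 0 := by omega
      simp [this]

theorem padAll_spec (rest : List (List Int)) (done : List (List Int)) (M : Nat)
    (hdone : ∀ r ∈ done, r.length = M) (hle : ∀ r ∈ rest, r.length ≤ M)
    (hex : ∃ r ∈ done ++ rest, r.length = M) :
    padAll done rest = rest.map (fun r => r ++ List.replicate (M - r.length) 0) := by
  induction rest generalizing done with
  | nil => simp [padAll]
  | cons x rest ih =>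
    have hle' : ∀ r ∈ done ++ x :: rest, r.length ≤ M := by
      intro r hr
      rcases List.mem_append.mp hr with h1 | h1
      · exact le_of_eq (hdone r h1)
      · exact hle r h1
    rw [padAll, pyMaxLen_eq _ M hle' hex,
      padWhile_spec M done x rest M hle' hex (by omega)]
    have hxlen : (x ++ List.replicate (M - x.length) 0).length = M := by
      have := hle x (by simp); simp; omega
    rw [ih (done ++ [x ++ List.replicate (M - x.length) 0])
      (by intro r hr
          rcases List.mem_append.mp hr with h1 | h1
          · exact hdone r h1
          · simp at h1; subst h1; exact hxlen)
      (fun r hr => hle r (by simp [hr]))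
      ⟨x ++ List.replicate (M - x.length) 0, by simp, hxlen⟩]
    simp
theorem runCounts_spec (l : List Int) (h : l.Pairwise (· ≤ ·)) :
    (∀ p ∈ runCounts l, p.1 ∈ l ∧ p.2 = ((l.count p.1 : Nat) : Int)) ∧
    ((runCounts l).map Prod.fst).Nodup ∧
    (∀ b ∈ l, ∃ c, (b, c) ∈ runCounts l) := by
  induction l using runCounts.induct with
  | case1 => simp [runCounts]
  | case2 a t ih =>
    set tk := t.takeWhile (· == a) with htk
    set d := t.dropWhile (· == a) with hd
    have htkd : tk ++ d = t := List.takeWhile_append_dropWhile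
    have htka : ∀ b ∈ tk, b = a := by
      intro b hb
      have := List.mem_takeWhile_imp hb
      simpa using this
    have hpt : t.Pairwise (· ≤ ·) := (List.pairwise_cons.mp h).2
    have hat : ∀ b ∈ t, a ≤ b := (List.pairwise_cons.mp h).1
    have hpd : d.Pairwise (· ≤ ·) := hpt.sublist (List.dropWhile_sublist _)
    have hgt : ∀ b ∈ d, a < b := by
      intro b hb
      cases hdc : d with
      | nil => simp [hdc] at hb
      | cons h0 d' =>
        have h' : List.dropWhile (fun x => x == a) t = h0 :: d' := by rw [← hd, hdc]
        have hne : List.dropWhile (fun x => x == a) t ≠ [] := by rw [h']; simp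
        have hh := List.head_dropWhile_not (fun x => x == a) hne
        have hhd : (List.dropWhile (fun x => x == a) t).head hne = h0 := by
          have e1 : (List.dropWhile (fun x => x == a) t).head? = some h0 := by rw [h']; rfl
          have e2 := (List.head?_eq_some_head hne).symm.trans e1
          exact Option.some.inj e2.symm |>.symm
        rw [hhd] at hh
        have hh0a : h0 ≠ a := by simpa using hh
        have hah0 : a ≤ h0 := hat h0 (by
          rw [← htkd]; exact List.mem_append.mpr (Or.inr (by simp [hdc])))
        rcases List.mem_cons.mp (by rw [← hdc]; exact hb) with h1 | h1
        · subst h1; omega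
        · have : h0 ≤ b := by
            have := (List.pairwise_cons.mp (by rw [hdc] at hpd; exact hpd)).1
            exact this b h1
          omega
    have hand : a ∉ d := fun hmem => lt_irrefl a (hgt a hmem)
    obtain ⟨ih1, ih2, ih3⟩ := ih hpd
    have hcount : ∀ b : Int, b ≠ a → (a :: t).count b = d.count b := by
      intro b hba
      have hab : ¬ a = b := fun he => hba he.symm
      rw [← htkd, List.count_cons, List.count_append]
      have : tk.count b = 0 := by
        rw [List.count_eq_zero]
        intro hb; exact hba (htka b hb)
      simp [this, hab]
    have hcounta : ((a :: t).count a : Int) = 1 + (tk.length : Int) := by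
      rw [← htkd, List.count_cons, List.count_append]
      have h1 : tk.count a = tk.length := by
        rw [List.count_eq_length]; intro b hb; rw [htka b hb]
      have h2 : d.count a = 0 := List.count_eq_zero.mpr hand
      simp [h1, h2]
      ring
    refine ⟨?_, ?_, ?_⟩
    · intro p hp
      rw [runCounts] at hp
      rcases List.mem_cons.mp hp with h1 | h1
      · rcases h1 with rfl
        exact ⟨by simp, hcounta.symm⟩
      · obtain ⟨hp1, hp2⟩ := ih1 p h1
        have hpa : p.1 ≠ a := fun he => lt_irrefl a (he ▸ hgt p.1 hp1)
        refine ⟨?_, ?_⟩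
        · rw [← htkd]; simp [hp1]
        · rw [hp2]
          have := hcount p.1 hpa
          simp [this]
    · rw [runCounts]
      simp only [List.map_cons, List.nodup_cons]
      refine ⟨?_, ih2⟩
      intro hmem
      obtain ⟨p, hp, hpe⟩ := List.mem_map.mp hmem
      exact (fun he => lt_irrefl a (he ▸ hgt p.1 (ih1 p hp).1)) hpe
    · intro b hb
      rcases List.mem_cons.mp hb with h1 | h1
      · subst h1
        refine ⟨1 + ((t.takeWhile (· == b)).length : Int), ?_⟩
        rw [runCounts]
        exact List.mem_cons_self
      · rw [← htkd] at h1
        rcases List.mem_append.mp h1 with h2 | h2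
        · rw [htka b h2]
          refine ⟨1 + ((t.takeWhile (· == a)).length : Int), ?_⟩
          rw [runCounts]
          exact List.mem_cons_self
        · obtain ⟨c, hc⟩ := ih3 b h2
          refine ⟨c, ?_⟩
          rw [runCounts]
          exact List.mem_cons_of_mem _ hc

theorem countA_nodup (x : List Int) :
    (((PySem.Set.ofList x).filter (fun a => decide (a ≠ 0))).map
      (fun a => (a, ((PySem.List.count x a : Nat) : Int)))).Nodup := by
  refine List.Nodup.map ?_ ((PySem.Set.nodup_ofList x).filter _)
  intro a b hab
  exact congrArg Prod.fst hab

theorem perm_counts (x : List Int) :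
    (((PySem.Set.ofList x).filter (fun a => decide (a ≠ 0))).map
        (fun a => (a, ((PySem.List.count x a : Nat) : Int)))).Perm
      ((runCounts (PySem.List.sorted x (fun v => v))).filter (fun p => decide (p.1 ≠ 0))) := by
  have hp : (PySem.List.sorted x (fun v => v)).Pairwise (· ≤ ·) := by
    simpa using PySem.List.sorted_pairwise x (fun v => v)
  obtain ⟨s1, s2, s3⟩ := runCounts_spec _ hp
  have hperm : (PySem.List.sorted x (fun v => v)).Perm x := PySem.List.sorted_perm x _ _
  refine (List.perm_ext_iff_of_nodup (countA_nodup x) ((s2.of_map _).filter _)).mpr ?_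
  intro p
  simp only [List.mem_map, List.mem_filter, PySem.Set.mem_ofList, decide_eq_true_eq]
  constructor
  · rintro ⟨a, ⟨hax, ha0⟩, rfl⟩
    have hal : a ∈ PySem.List.sorted x (fun v => v) := (PySem.List.mem_sorted _ _ _ _).mpr hax
    obtain ⟨c, hc⟩ := s3 a hal
    have hc2 := (s1 _ hc).2
    simp only at hc2
    rw [hperm.count_eq] at hc2
    have hce : ((PySem.List.count x a : Nat) : Int) = c := hc2.symm
    rw [hce]
    exact ⟨hc, by simpa using ha0⟩
  · rintro ⟨hpr, hp0⟩
    obtain ⟨h1, h2⟩ := s1 p hpr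
    rw [hperm.count_eq] at h2
    refine ⟨p.1, ⟨(PySem.List.mem_sorted _ _ _ _).mp h1, hp0⟩, ?_⟩
    exact Prod.ext rfl h2.symm

theorem row_eq (x : List Int) :
    (PySem.List.sorted2
        ((PySem.Set.ofList x).foldl
          (fun count a => if a = 0 then count else count ++ [(a, ((PySem.List.count x a : Nat) : Int))])
          ([] : List (Int × Int)))
        (fun p => p.2) (fun p => p.1)).foldl
      (fun temp p => temp ++ [p.1, p.2]) ([] : List Int)
    = (PySem.List.sorted2
        (((runCounts (PySem.List.sorted x (fun v => v))).filter
            (fun p => decide (p.1 ≠ 0))).map (fun p => (p.2, p.1)))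
        (fun p => p.1) (fun p => p.2)).flatMap (fun p => [p.2, p.1]) := by
  rw [countA_eq, sorted2_eq_sorted_lex, sorted2_eq_sorted_lex,
    PySem.List.foldl_append_eq_flatMap (g := fun p : Int × Int => [p.1, p.2])]
  set cA := ((PySem.Set.ofList x).filter (fun a => decide (a ≠ 0))).map
      (fun a => (a, ((PySem.List.count x a : Nat) : Int))) with hca
  set L := PySem.List.sorted cA (fun a : Int × Int => toLex (a.2, a.1)) with hL
  have hkeyinj : Function.Injective (fun a : Int × Int => toLex (a.2, a.1)) := by
    intro p q hpq
    simp only [toLex_inj, Prod.mk.injEq] at hpq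
    exact Prod.ext hpq.2 hpq.1
  have hLperm : L.Perm cA := PySem.List.sorted_perm _ _ _
  have hLnodup : L.Nodup := hLperm.nodup_iff.mpr (countA_nodup x)
  have hLle : L.Pairwise (fun a b : Int × Int => toLex (a.2, a.1) ≤ toLex (b.2, b.1)) :=
    PySem.List.sorted_pairwise cA _
  have hLlt : L.Pairwise (fun a b : Int × Int => toLex (a.2, a.1) < toLex (b.2, b.1)) := by
    refine (hLle.and hLnodup).imp ?_
    rintro a b ⟨hle, hne⟩
    exact lt_of_le_of_ne hle (fun hk => hne (hkeyinj hk))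
  have hmain : PySem.List.sorted
      (((runCounts (PySem.List.sorted x (fun v => v))).filter
          (fun p => decide (p.1 ≠ 0))).map (fun p => (p.2, p.1)))
      (fun a : Int × Int => toLex (a.1, a.2))
      = L.map (fun p : Int × Int => (p.2, p.1)) := by
    apply PySem.List.sorted_eq_of_perm_of_pairwise_lt
    · exact (hLperm.trans (perm_counts x)).map _
    · rw [List.pairwise_map]
      exact hLlt
  rw [hmain]
  simp [List.flatMap_map]
theorem pyMaxLen_mem (rows : List (List Int)) (h : rows ≠ []) :
    (∃ r ∈ rows, r.length = pyMaxLen rows) ∧ ∀ r ∈ rows, r.length ≤ pyMaxLen rows := by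
  unfold pyMaxLen PySem.List.maxD
  cases hm : PySem.List.max? rows (fun r => PySem.List.len r) with
  | none => rw [PySem.List.max?_eq_none_iff] at hm; exact absurd hm h
  | some m =>
    refine ⟨⟨m, PySem.List.max?_mem hm, by simp⟩, ?_⟩
    intro r hr
    have := PySem.List.max?_isMax hm r hr
    simp only [PySem.List.len_eq] at this
    simp only [Option.getD_some]
    omega

-- ===== VERDICT (by name: the statement is the Claim_ definition above) =====
theorem sort_graph_spec : Claim_equal_sort_graph := by
  intro graph command _
  unfold Spec_sort_graph sort_graph sort_graph_alt
  simp only []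
  set g' : List (List Int) := if command = "C" then pyZipT graph else graph with hg'
  have hrows : g'.foldl
      (fun result x => result ++
        [(PySem.List.sorted2
            ((PySem.Set.ofList x).foldl
              (fun count a => if a = 0 then count
                else count ++ [(a, ((PySem.List.count x a : Nat) : Int))])
              ([] : List (Int × Int)))
            (fun p => p.2) (fun p => p.1)).foldl
          (fun temp p => temp ++ [p.1, p.2]) ([] : List Int)]) []
      = g'.map (fun row =>
        (PySem.List.sorted2
          (((runCounts (PySem.List.sorted row (fun v => v))).filter
              (fun p => decide (p.1 ≠ 0))).map (fun p => (p.2, p.1)))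
          (fun p => p.1) (fun p => p.2)).flatMap (fun p => [p.2, p.1])) := by
    rw [PySem.List.foldl_append_singleton_eq_map]
    simp only [List.nil_append]
    exact List.map_congr_left (fun x _ => row_eq x)
  rw [hrows]
  set rows := g'.map (fun row =>
        (PySem.List.sorted2
          (((runCounts (PySem.List.sorted row (fun v => v))).filter
              (fun p => decide (p.1 ≠ 0))).map (fun p => (p.2, p.1)))
          (fun p => p.1) (fun p => p.2)).flatMap (fun p => [p.2, p.1])) with hrowsdef
  by_cases hnil : rows = []
  · rw [hnil]
    simp [padAll]
  · obtain ⟨hex, hle⟩ := pyMaxLen_mem rows hnil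
    have hA : padAll [] rows
        = rows.map (fun r => r ++ List.replicate (pyMaxLen rows - r.length) 0) :=
      padAll_spec rows [] (pyMaxLen rows) (by simp) hle (by simpa using hex)
    have hw := width_eq rows hnil
    have hB : rows.map (fun r => r ++ List.replicate
          ((PySem.List.maxD (rows.map (fun r => PySem.List.len r)) (fun n => n) 0
            - PySem.List.len r).toNat) 0)
        = rows.map (fun r => r ++ List.replicate (pyMaxLen rows - r.length) 0) := by
      refine List.map_congr_left ?_
      intro r hr
      have hrle := hle r hr
      rw [hw]
      simp only [PySem.List.len_eq]
      congr 2
      omega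
    rw [hA, hB]
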